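-- pv_equiv track=rewrite | github.com/Manoy54/FinQuest-Repo | solve2.py | verify_intersections
-- ===== SOURCE A (Python) =====
-- def verify_intersections(across_placements, down_placements):
--     """Check all cells that are covered by both an across and down word."""
--     errors = []
--     oks = []
--     for an, (aword, ar, ac) in across_placements.items():
--         for dn, (dword, dr, dc) in down_placements.items():
--             # Check if they intersect
--             # Across covers row=ar, cols ac to ac+len-1
--             # Down covers col=dc, rows dr to dr+len-1
--             if ar >= dr and ar < dr + len(dword) and dc >= ac and dc < ac + len(aword):
--                 # They intersect at (ar, dc)
--                 al = aword[dc - ac]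
--                 dl = dword[ar - dr]
--                 if al == dl:
--                     oks.append((ar, dc, al, f"{an}A[{dc-ac}]", f"{dn}D[{ar-dr}]"))
--                 else:
--                     errors.append((ar, dc, al, dl, f"{an}A", f"{dn}D"))
--     return oks, errors
-- ===== SOURCE B (Python) =====
-- def verify_intersections(across_placements, down_placements):
--     """Check all cells that are covered by both an across and down word.
--
--     Spatial index: bucket the down words by their column, so each across word
--     only examines the down words whose column lies under one of its cells;
--     per across word the hits are sorted back into down insertion order.
--     """
--     col_index = {}
--     for i, (dn, (dword, dr, dc)) in enumerate(down_placements.items()):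
--         col_index.setdefault(dc, []).append((i, dn, dword, dr, dc))
--     oks = []
--     errors = []
--     for an, (aword, ar, ac) in across_placements.items():
--         hits = []
--         for j in range(len(aword)):
--             for entry in col_index.get(ac + j, ()):
--                 dr = entry[3]
--                 if dr <= ar < dr + len(entry[2]):
--                     hits.append(entry)
--         hits.sort(key=lambda e: e[0])
--         for (i, dn, dword, dr, dc) in hits:
--             al = aword[dc - ac]
--             dl = dword[ar - dr]
--             if al == dl:
--                 oks.append((ar, dc, al, f"{an}A[{dc-ac}]", f"{dn}D[{ar-dr}]"))
--             else:
--                 errors.append((ar, dc, al, dl, f"{an}A", f"{dn}D"))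
--     return oks, errors
-- ===== Notes on version B (the rewrite author's own statement) =====
-- stated objective: alternative
-- what changed: Replaces A's all-pairs across×down scan by a column index (dict column -> indexed down entries) built once; each across word only visits the down words under its own cells and re-sorts its hits into down insertion order. On dense inputs where most pairs intersect the output itself is quadratic, so no measured speed-up is claimed.
import Mathlib
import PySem

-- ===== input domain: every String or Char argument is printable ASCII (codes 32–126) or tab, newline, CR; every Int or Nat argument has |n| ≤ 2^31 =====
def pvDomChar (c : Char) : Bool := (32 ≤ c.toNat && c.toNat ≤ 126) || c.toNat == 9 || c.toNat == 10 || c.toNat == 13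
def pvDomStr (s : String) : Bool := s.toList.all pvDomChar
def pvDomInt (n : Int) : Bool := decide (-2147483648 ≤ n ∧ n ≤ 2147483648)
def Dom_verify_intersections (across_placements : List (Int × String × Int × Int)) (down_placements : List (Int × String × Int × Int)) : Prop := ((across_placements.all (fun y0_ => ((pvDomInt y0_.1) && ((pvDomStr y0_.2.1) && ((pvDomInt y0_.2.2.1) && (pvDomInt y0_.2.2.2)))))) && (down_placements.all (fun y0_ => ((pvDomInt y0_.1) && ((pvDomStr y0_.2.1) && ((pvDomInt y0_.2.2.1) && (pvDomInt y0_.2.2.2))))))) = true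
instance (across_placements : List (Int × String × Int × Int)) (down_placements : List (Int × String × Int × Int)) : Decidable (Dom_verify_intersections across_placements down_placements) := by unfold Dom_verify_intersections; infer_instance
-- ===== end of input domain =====

-- B replaces A's all-pairs scan by a column index over the down words (each across word
-- only meets the down words under its own cells, re-sorted into down insertion order);
-- the return value is proved identical.

-- s[i] as a one-character string; both programs only evaluate it under a guard that
-- keeps i in range, so the "" default is never taken (Python would raise out of range).
def pyCharAt (s : String) (i : Int) : String :=
  match PySem.Str.pyGet? s i with
  | some c => String.ofList [c]
  | none => ""

-- ===== PORT A =====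
def verify_intersections (across_placements : List (Int × String × Int × Int)) (down_placements : List (Int × String × Int × Int)) : (List (Int × Int × String × String × String)) × (List (Int × Int × String × String × String × String)) :=
  across_placements.foldl
    (fun st ap =>
      down_placements.foldl
        (fun st dp =>
          if dp.2.2.1 ≤ ap.2.2.1 ∧ ap.2.2.1 < dp.2.2.1 + (PySem.Str.len dp.2.1 : Int) ∧
             ap.2.2.2 ≤ dp.2.2.2 ∧ dp.2.2.2 < ap.2.2.2 + (PySem.Str.len ap.2.1 : Int) then
            let al := pyCharAt ap.2.1 (dp.2.2.2 - ap.2.2.2)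
            let dl := pyCharAt dp.2.1 (ap.2.2.1 - dp.2.2.1)
            if al == dl then
              (st.1 ++ [(ap.2.2.1, dp.2.2.2, al,
                PySem.Int.toStr ap.1 ++ "A[" ++ PySem.Int.toStr (dp.2.2.2 - ap.2.2.2) ++ "]",
                PySem.Int.toStr dp.1 ++ "D[" ++ PySem.Int.toStr (ap.2.2.1 - dp.2.2.1) ++ "]")], st.2)
            else
              (st.1, st.2 ++ [(ap.2.2.1, dp.2.2.2, al, dl,
                PySem.Int.toStr ap.1 ++ "A", PySem.Int.toStr dp.1 ++ "D")])
          else st)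
        st)
    ([], [])

-- ===== PORT B =====
def verify_intersections_alt (across_placements : List (Int × String × Int × Int)) (down_placements : List (Int × String × Int × Int)) : (List (Int × Int × String × String × String)) × (List (Int × Int × String × String × String × String)) :=
  -- col_index: column → down entries (i, dn, dword, dr, dc) in that column, insertion order
  let colIndex : PySem.Dict Int (List (Int × Int × String × Int × Int)) :=
    (PySem.List.enumerate down_placements 0).foldl
      (fun d e => d.modify e.2.2.2.2 [] (· ++ [e]))
      PySem.Dict.empty
  across_placements.foldl
    (fun st ap =>
      let hits :=
        (PySem.List.pyRange 0 (PySem.Str.len ap.2.1 : Int) 1).foldl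
          (fun hits j =>
            (colIndex.getD (ap.2.2.2 + j) []).foldl
              (fun hits e =>
                if e.2.2.2.1 ≤ ap.2.2.1 ∧ ap.2.2.1 < e.2.2.2.1 + (PySem.Str.len e.2.2.1 : Int) then
                  hits ++ [e]
                else hits)
              hits)
          []
      (PySem.List.sorted hits (fun e => e.1) false).foldl
        (fun st e =>
          let al := pyCharAt ap.2.1 (e.2.2.2.2 - ap.2.2.2)
          let dl := pyCharAt e.2.2.1 (ap.2.2.1 - e.2.2.2.1)
          if al == dl then
            (st.1 ++ [(ap.2.2.1, e.2.2.2.2, al,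
              PySem.Int.toStr ap.1 ++ "A[" ++ PySem.Int.toStr (e.2.2.2.2 - ap.2.2.2) ++ "]",
              PySem.Int.toStr e.2.1 ++ "D[" ++ PySem.Int.toStr (ap.2.2.1 - e.2.2.2.1) ++ "]")], st.2)
          else
            (st.1, st.2 ++ [(ap.2.2.1, e.2.2.2.2, al, dl,
              PySem.Int.toStr ap.1 ++ "A", PySem.Int.toStr e.2.1 ++ "D")]))
        st)
    ([], [])

-- ===== PRECONDITION & SPEC =====
def Spec_verify_intersections (across_placements : List (Int × String × Int × Int)) (down_placements : List (Int × String × Int × Int)) (out : (List (Int × Int × String × String × String)) × (List (Int × Int × String × String × String × String))) : Prop := out = verify_intersections_alt across_placements down_placements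
instance (across_placements : List (Int × String × Int × Int)) (down_placements : List (Int × String × Int × Int)) (out : (List (Int × Int × String × String × String)) × (List (Int × Int × String × String × String × String))) : Decidable (Spec_verify_intersections across_placements down_placements out) := by
  unfold Spec_verify_intersections
  letI : DecidableEq (Int × Int × String × String × String × String) := inferInstance
  infer_instance

-- ===== CLAIM (what is proved, stated in full; the proofs are below) =====
def Claim_equal_verify_intersections : Prop := ∀ (across_placements : List (Int × String × Int × Int)) (down_placements : List (Int × String × Int × Int)), Dom_verify_intersections across_placements down_placements → Spec_verify_intersections across_placements down_placements (verify_intersections across_placements down_placements)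

-- ===== LEMMAS AND PROOFS =====


-- ---- proof-only helpers (used nowhere above the claim block) ----

-- the row test of the intersection condition, as a Bool on an indexed down entry
def viRowB (ar : Int) (e : Int × Int × String × Int × Int) : Bool :=
  decide (e.2.2.2.1 ≤ ar ∧ ar < e.2.2.2.1 + (PySem.Str.len e.2.2.1 : Int))

-- the column test of the intersection condition
def viColB (aword : String) (ac : Int) (e : Int × Int × String × Int × Int) : Bool :=
  decide (ac ≤ e.2.2.2.2 ∧ e.2.2.2.2 < ac + (PySem.Str.len aword : Int))

-- A's guarded inner loop over a list is the loop over the filtered enumeration (the index is unused)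
theorem vi_foldl_guard {α σ : Type} (p : α → Prop) [DecidablePred p] (f : σ → α → σ)
    (l : List α) (s : Int) (st : σ) :
    l.foldl (fun st x => if p x then f st x else st) st
      = ((PySem.List.enumerate l s).filter (fun e => decide (p e.2))).foldl (fun st e => f st e.2) st := by
  induction l generalizing s st with
  | nil => simp [PySem.List.enumerate_nil]
  | cons x xs ih =>
    rw [PySem.List.enumerate_cons]
    by_cases h : p x
    · rw [List.foldl_cons, if_pos h, List.filter_cons_of_pos (by simpa using h), List.foldl_cons]
      exact ih (s + 1) (f st x)
    · rw [List.foldl_cons, if_neg h, List.filter_cons_of_neg (by simpa using h)]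
      exact ih (s + 1) st

-- B's column index looked up at c is the enumeration filtered to column c
theorem vi_bucket (down : List (Int × String × Int × Int)) (c : Int) :
    ((PySem.List.enumerate down 0).foldl (fun d e => d.modify e.2.2.2.2 [] (· ++ [e]))
        PySem.Dict.empty).getD c []
      = (PySem.List.enumerate down 0).filter (fun e => e.2.2.2.2 == c) := by
  have h : (PySem.List.enumerate down 0).foldl (fun d e => d.modify e.2.2.2.2 [] (· ++ [e]))
        (PySem.Dict.empty : PySem.Dict Int (List (Int × Int × String × Int × Int)))
      = ((PySem.List.enumerate down 0).map (fun e => (e.2.2.2.2, e))).foldl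
          (fun d p => d.modify p.1 [] (· ++ [p.2])) PySem.Dict.empty := by
    rw [List.foldl_map]
  rw [h, PySem.Dict.getD_foldl_modify_append]
  simp [List.filter_map, List.map_map, Function.comp_def]

-- the enumeration has no duplicate entries (indices strictly increase)
theorem vi_nodup_enumerate (down : List (Int × String × Int × Int)) :
    (PySem.List.enumerate down 0).Nodup :=
  (PySem.List.pairwise_lt_enumerate down 0).imp
    (fun hlt heq => absurd (heq ▸ hlt) (lt_irrefl _))

-- pyRange 0 ↑n is strictly increasing
theorem vi_pairwise_pyRange (n : Nat) :
    (PySem.List.pyRange 0 (n : Int)).Pairwise (· < ·) := by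
  rw [PySem.List.pyRange_zero_natCast]
  exact List.pairwise_map.mpr (List.pairwise_lt_range.imp (fun h => by exact_mod_cast h))

-- the per-column buckets, concatenated over the across word's columns, are a permutation of
-- the down entries meeting the full intersection condition
theorem vi_perm (down : List (Int × String × Int × Int)) (aword : String) (ar ac : Int) :
    ((PySem.List.pyRange 0 (PySem.Str.len aword : Int)).flatMap
        (fun j => (PySem.List.enumerate down 0).filter
          (fun e => viRowB ar e && (e.2.2.2.2 == ac + j)))).Perm
      ((PySem.List.enumerate down 0).filter
        (fun e => viRowB ar e && viColB aword ac e)) := by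
  have hE := vi_nodup_enumerate down
  have h1 : ((PySem.List.pyRange 0 (PySem.Str.len aword : Int)).flatMap
      (fun j => (PySem.List.enumerate down 0).filter
        (fun e => viRowB ar e && (e.2.2.2.2 == ac + j)))).Nodup := by
    rw [List.nodup_flatMap]
    refine ⟨fun j _ => hE.filter _, ?_⟩
    refine (vi_pairwise_pyRange _).imp ?_
    intro j j' hlt a ha ha'
    have h1 := (List.mem_filter.mp ha).2
    have h2 := (List.mem_filter.mp ha').2
    simp only [Bool.and_eq_true, beq_iff_eq] at h1 h2
    omega
  refine (List.perm_ext_iff_of_nodup h1 (hE.filter _)).mpr ?_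
  intro a
  simp only [List.mem_flatMap, List.mem_filter, PySem.List.mem_pyRange_one,
    Bool.and_eq_true, beq_iff_eq, viColB, decide_eq_true_eq]
  constructor
  · rintro ⟨j, ⟨hj0, hjn⟩, ha, hrow, hcol⟩
    exact ⟨ha, hrow, by omega⟩
  · rintro ⟨ha, hrow, hcol⟩
    exact ⟨a.2.2.2.2 - ac, by omega, ha, hrow, by omega⟩

-- B's hits accumulation is the concatenation of the per-column buckets, row-filtered
theorem vi_hits (down : List (Int × String × Int × Int)) (aword : String) (ar ac : Int) :
    (PySem.List.pyRange 0 (PySem.Str.len aword)).foldl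
      (fun hits j =>
        ((PySem.List.enumerate down 0).foldl (fun d e => d.modify e.2.2.2.2 [] (· ++ [e]))
            PySem.Dict.empty).getD (ac + j) [] |>.foldl
          (fun hits e =>
            if e.2.2.2.1 ≤ ar ∧ ar < e.2.2.2.1 + PySem.Str.len e.2.2.1 then hits ++ [e] else hits)
          hits) []
    = (PySem.List.pyRange 0 (PySem.Str.len aword)).flatMap
        (fun j => (PySem.List.enumerate down 0).filter
          (fun e => viRowB ar e && (e.2.2.2.2 == ac + j))) := by
  rw [PySem.List.foldl_congr_mem _ _
      (fun hits j => hits ++ (PySem.List.enumerate down 0).filter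
        (fun e => viRowB ar e && (e.2.2.2.2 == ac + j))) [] ?_]
  · rw [PySem.List.foldl_append_eq_flatMap]; simp
  · intro acc j _
    rw [vi_bucket,
      show (fun (hits : List (Int × Int × String × Int × Int)) e =>
          if e.2.2.2.1 ≤ ar ∧ ar < e.2.2.2.1 + PySem.Str.len e.2.2.1 then hits ++ [e] else hits)
        = (fun hits e => if viRowB ar e = true then hits ++ [id e] else hits) from
        funext₂ (fun hits e => by simp [viRowB]),
      PySem.List.foldl_append_if (viRowB ar) id, List.filter_filter]
    simp

-- A's flat intersection test equals the row-test && column-test pair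
theorem vi_pred_eq (aword : String) (ar ac : Int) (e : Int × Int × String × Int × Int) :
    decide (e.2.2.2.1 ≤ ar ∧ ar < e.2.2.2.1 + PySem.Str.len e.2.2.1 ∧
        ac ≤ e.2.2.2.2 ∧ e.2.2.2.2 < ac + PySem.Str.len aword)
      = (viRowB ar e && viColB aword ac e) := by
  by_cases h1 : e.2.2.2.1 ≤ ar ∧ ar < e.2.2.2.1 + PySem.Str.len e.2.2.1 <;>
    by_cases h2 : ac ≤ e.2.2.2.2 ∧ e.2.2.2.2 < ac + PySem.Str.len aword <;>
    simp [viRowB, viColB, h1, h2, Bool.and_assoc]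

-- ===== VERDICT (by name: the statement is the Claim_ definition above) =====
theorem verify_intersections_spec : Claim_equal_verify_intersections := by
  intro across down _
  unfold Spec_verify_intersections verify_intersections verify_intersections_alt
  refine PySem.List.foldl_congr_mem across _ _ _ ?_ |>.symm
  intro st ap _
  rw [vi_hits down ap.2.1 ap.2.2.1 ap.2.2.2]
  dsimp only
  rw [PySem.List.sorted_eq_of_perm_of_pairwise_lt _ _ (fun e => e.1)
      (vi_perm down ap.2.1 ap.2.2.1 ap.2.2.2).symm
      ((PySem.List.pairwise_lt_enumerate down 0).filter _)]
  rw [vi_foldl_guard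
      (fun dp => dp.2.2.1 ≤ ap.2.2.1 ∧ ap.2.2.1 < dp.2.2.1 + PySem.Str.len dp.2.1 ∧
        ap.2.2.2 ≤ dp.2.2.2 ∧ dp.2.2.2 < ap.2.2.2 + PySem.Str.len ap.2.1)
      (fun st dp =>
        let al := pyCharAt ap.2.1 (dp.2.2.2 - ap.2.2.2)
        let dl := pyCharAt dp.2.1 (ap.2.2.1 - dp.2.2.1)
        if al == dl then
          (st.1 ++ [(ap.2.2.1, dp.2.2.2, al,
            PySem.Int.toStr ap.1 ++ "A[" ++ PySem.Int.toStr (dp.2.2.2 - ap.2.2.2) ++ "]",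
            PySem.Int.toStr dp.1 ++ "D[" ++ PySem.Int.toStr (ap.2.2.1 - dp.2.2.1) ++ "]")], st.2)
        else
          (st.1, st.2 ++ [(ap.2.2.1, dp.2.2.2, al, dl,
            PySem.Int.toStr ap.1 ++ "A", PySem.Int.toStr dp.1 ++ "D")]))
      down 0 st]
  rw [List.filter_congr (fun e _ => vi_pred_eq ap.2.1 ap.2.2.1 ap.2.2.2 e)]
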